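-- pv_equiv track=rewrite | github.com/atbasu/document-content-extractor | ascii_output_generator.py | generate_ascii_table_from_string
-- ===== SOURCE A (Python) =====
-- def longest_value_length(field_name):
--     return max(map(len, field_name))
--
-- def generate_ascii_table_from_string(input_str, config, logger=None):
--     # Split input string by newline characters to get each row
--     lines = input_str.strip().split('\n')
--     possible_fields = config.keys()
--     max_field_name_len = longest_value_length(possible_fields) + 1
--
--     result = dict()
--     last_name = ''
--
--     # Create the header row for the ASCII table
--     header = f"{'Field Name':<{max_field_name_len}}| {'Field Value':<}"
--
--     # Create the separator row for the ASCII table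
--     separator = '+' + '-' * (max_field_name_len - 1) + '|' + '-' * 50 + '+'
--
--     # Initialize the ASCII table with the header and separator rows
--     table = [header, separator]
--
--     # Loop through the lines in the input string
--     for line in lines:
--         try:
--             # Split the line into the field name and field value
--             name, value = line.split(':', maxsplit=1)
--             table.append(f"{name.strip():<{max_field_name_len}}| {value.strip():<}")
--             result[name] = value.strip()
--             last_name = name
--         except ValueError:
--             # Handle the case where there is no ':' in the line
--             if last_name != '':
--                 table[-1] += line.strip()
--                 result[last_name] += line.strip()
--             else:
--                 continue
--         # Add the field name and field value to the table
--     # Add the final separator row to the table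
--     table.append(separator)
--
--     # Join the rows of the table into a single string
--     table_str = '\n'.join(table)
--
--     return table_str, result
-- ===== SOURCE B (Python) =====
-- def generate_ascii_table_from_string(input_str, config, logger=None):
--     max_field_name_len = max(map(len, config.keys())) + 1
--
--     # First pass: accumulate ordered records of (raw name, accumulated value).
--     records = []
--     for line in input_str.strip().split('\n'):
--         try:
--             name, value = line.split(':', maxsplit=1)
--             records.append([name, value.strip()])
--         except ValueError:
--             if records and records[-1][0] != '':
--                 records[-1][1] += line.strip()
--
--     # Second pass: render the table and build the dict from the records.
--     header = f"{'Field Name':<{max_field_name_len}}| {'Field Value':<}"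
--     separator = '+' + '-' * (max_field_name_len - 1) + '|' + '-' * 50 + '+'
--     rows = [header, separator]
--     rows += [f"{name.strip():<{max_field_name_len}}| {value}" for name, value in records]
--     rows.append(separator)
--
--     result = {}
--     for name, value in records:
--         result[name] = value
--
--     return '\n'.join(rows), result
-- ===== Notes on version B (the rewrite author's own statement) =====
-- stated objective: alternative
-- what changed: Replaces A's single loop that mutates the table, the result dict and a last_name sentinel in lockstep with a two-pass design: a first pass folds the lines into an ordered list of (raw name, accumulated value) records (continuations append to the last record), then the table rows and the dict are each derived from that record list.
-- outside the precondition, e.g. on generate_ascii_table_from_string('a: 1', {}, None): A raises ValueError, B raises ValueError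
import Mathlib
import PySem

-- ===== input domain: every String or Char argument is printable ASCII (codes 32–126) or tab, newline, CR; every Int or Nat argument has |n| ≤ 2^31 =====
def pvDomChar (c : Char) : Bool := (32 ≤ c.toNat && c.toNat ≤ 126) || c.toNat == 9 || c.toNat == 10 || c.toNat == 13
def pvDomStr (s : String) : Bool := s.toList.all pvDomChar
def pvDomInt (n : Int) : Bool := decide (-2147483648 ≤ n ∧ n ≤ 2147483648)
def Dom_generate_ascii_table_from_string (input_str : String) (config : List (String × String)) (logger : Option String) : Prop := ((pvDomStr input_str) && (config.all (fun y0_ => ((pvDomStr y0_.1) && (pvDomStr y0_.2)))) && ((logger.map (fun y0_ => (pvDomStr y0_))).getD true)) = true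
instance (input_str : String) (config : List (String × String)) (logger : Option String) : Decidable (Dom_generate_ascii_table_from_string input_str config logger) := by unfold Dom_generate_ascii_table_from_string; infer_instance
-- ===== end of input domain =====

-- B re-implements A as two passes over an ordered record list (accumulate records first,
-- then render the table and build the dict from them); return value proved equal to A's.

-- Shared formatting helpers (both Pythons compute header/separator/width by the same formulas).
def pvRepeatChar (c : Char) (n : Int) : String := String.ofList (List.replicate n.toNat c)

-- f"{s:<{w}}" (left-justify with spaces, no truncation)
def pvPad (s : String) (w : Int) : String := s ++ pvRepeatChar ' ' (w - PySem.Str.len s)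

def pvHeader (w : Int) : String := pvPad "Field Name" w ++ "| " ++ "Field Value"

def pvSep (w : Int) : String := "+" ++ pvRepeatChar '-' (w - 1) ++ "|" ++ pvRepeatChar '-' 50 ++ "+"

-- a table row: f"{name.strip():<{w}}| {value}"  (value is already stripped/accumulated)
def pvRow (w : Int) (name value : String) : String := pvPad (PySem.Str.strip name) w ++ "| " ++ value

-- max(map(len, config.keys())) + 1; Python raises ValueError on an empty dict (excluded by Pre_),
-- the `none` default is never reached under Pre_.
def pvMaxLen (config : List (String × String)) : Int :=
  match PySem.List.max? ((PySem.List.dedup (config.map (·.1))).map PySem.Str.len) (fun x => x) with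
  | some m => m + 1
  | none => 1

-- ===== PORT A =====
-- table[-1] += s
def pvAppendLast : List String → String → List String
  | [], _ => []
  | [x], s => [x ++ s]
  | x :: y :: xs, s => x :: pvAppendLast (y :: xs) s

-- A's loop body; state = (table, result, last_name).
-- In the continuation branch last_name is a present key, so Python's
-- `result[last_name] += s` (get then set) is ported as getD + insert, exact there.
def pvStepA (w : Int) (st : List String × PySem.Dict String String × String) (line : String) :
    List String × PySem.Dict String String × String :=
  match PySem.Str.splitMax? line ":" 1 with
  | some [name, value] =>
      (st.1 ++ [pvRow w name (PySem.Str.strip value)],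
       st.2.1.insert name (PySem.Str.strip value), name)
  | _ =>
      if st.2.2 ≠ "" then
        (pvAppendLast st.1 (PySem.Str.strip line),
         st.2.1.insert st.2.2 ((st.2.1.getD st.2.2 "") ++ PySem.Str.strip line), st.2.2)
      else st

def generate_ascii_table_from_string (input_str : String) (config : List (String × String)) (logger : Option String) : String × (List (String × String)) :=
  -- split? is never none ("\n" ≠ ""); the [] default is unreachable
  let lines := (PySem.Str.split? (PySem.Str.strip input_str) "\n").getD []
  let w := pvMaxLen config
  let st := lines.foldl (pvStepA w) ([pvHeader w, pvSep w], PySem.Dict.empty, "")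
  (PySem.Str.join "\n" (st.1 ++ [pvSep w]), st.2.1.items)

-- ===== PORT B =====
-- B's first pass: ordered records of (raw name, accumulated value);
-- records[-1][1] += s renders as dropLast ++ [updated last].
def pvStepB (rs : List (String × String)) (line : String) : List (String × String) :=
  match PySem.Str.splitMax? line ":" 1 with
  | some [name, value] => rs ++ [(name, PySem.Str.strip value)]
  | _ =>
      match rs.getLast? with
      | some (n, v) => if n ≠ "" then rs.dropLast ++ [(n, v ++ PySem.Str.strip line)] else rs
      | none => rs

def generate_ascii_table_from_string_alt (input_str : String) (config : List (String × String)) (logger : Option String) : String × (List (String × String)) :=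
  let w := pvMaxLen config
  let records := ((PySem.Str.split? (PySem.Str.strip input_str) "\n").getD []).foldl pvStepB []
  let rows := [pvHeader w, pvSep w] ++ records.map (fun p => pvRow w p.1 p.2) ++ [pvSep w]
  (PySem.Str.join "\n" rows,
   (records.foldl (fun d p => d.insert p.1 p.2) (PySem.Dict.empty : PySem.Dict String String)).items)

-- ===== PRECONDITION & SPEC =====
-- Pre_ excludes only the empty config dict, on which A raises ValueError (max() of an empty sequence).
def Pre_generate_ascii_table_from_string (input_str : String) (config : List (String × String)) (logger : Option String) : Prop := config ≠ []
instance (input_str : String) (config : List (String × String)) (logger : Option String) : Decidable (Pre_generate_ascii_table_from_string input_str config logger) := by unfold Pre_generate_ascii_table_from_string; infer_instance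

def pvWitness_generate_ascii_table_from_string : String × (List (String × String)) × Option String :=
  ("name: Ada\n cont\nage: 36", [("name", ""), ("age", "")], none)

def Spec_generate_ascii_table_from_string (input_str : String) (config : List (String × String)) (logger : Option String) (out : String × (List (String × String))) : Prop := out = generate_ascii_table_from_string_alt input_str config logger
instance (input_str : String) (config : List (String × String)) (logger : Option String) (out : String × (List (String × String))) : Decidable (Spec_generate_ascii_table_from_string input_str config logger out) := by unfold Spec_generate_ascii_table_from_string; infer_instance

-- ===== CLAIM (what is proved, stated in full; the proofs are below) =====
def Claim_equal_generate_ascii_table_from_string : Prop := ∀ (input_str : String) (config : List (String × String)) (logger : Option String), Dom_generate_ascii_table_from_string input_str config logger → Pre_generate_ascii_table_from_string input_str config logger → Spec_generate_ascii_table_from_string input_str config logger (generate_ascii_table_from_string input_str config logger)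

-- ===== LEMMAS AND PROOFS =====

theorem pvWitness_ok :
    Dom_generate_ascii_table_from_string (pvWitness_generate_ascii_table_from_string.1) (pvWitness_generate_ascii_table_from_string.2.1) (pvWitness_generate_ascii_table_from_string.2.2) ∧
    Pre_generate_ascii_table_from_string (pvWitness_generate_ascii_table_from_string.1) (pvWitness_generate_ascii_table_from_string.2.1) (pvWitness_generate_ascii_table_from_string.2.2) := by
  decide

-- the dict B builds from a record list
def pvDictOf (rs : List (String × String)) : PySem.Dict String String :=
  rs.foldl (fun d p => d.insert p.1 p.2) PySem.Dict.empty

-- A's last_name, reconstructed from the records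
def pvLastNameOf (rs : List (String × String)) : String := ((rs.getLast?).map (·.1)).getD ""

theorem pvAppendLast_append (xs ys : List String) (s : String) (h : ys ≠ []) :
    pvAppendLast (xs ++ ys) s = xs ++ pvAppendLast ys s := by
  induction xs with
  | nil => rfl
  | cons x xs ih =>
      cases xs with
      | nil => cases ys with
        | nil => exact absurd rfl h
        | cons y ys => rfl
      | cons x' xs' => simpa [pvAppendLast] using ih

theorem pvDictOf_concat (rs : List (String × String)) (p : String × String) :
    pvDictOf (rs ++ [p]) = (pvDictOf rs).insert p.1 p.2 := by
  simp [pvDictOf]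

theorem pvContCase_agree (w : Int) (pref : List String) (rs : List (String × String)) (line : String) :
    (if pvLastNameOf rs ≠ "" then
        (pvAppendLast (pref ++ rs.map (fun p => pvRow w p.1 p.2)) (PySem.Str.strip line),
         (pvDictOf rs).insert (pvLastNameOf rs)
           (((pvDictOf rs).getD (pvLastNameOf rs) "") ++ PySem.Str.strip line),
         pvLastNameOf rs)
      else (pref ++ rs.map (fun p => pvRow w p.1 p.2), pvDictOf rs, pvLastNameOf rs))
    = (let rs' := match rs.getLast? with
        | some (n, v) => if n ≠ "" then rs.dropLast ++ [(n, v ++ PySem.Str.strip line)] else rs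
        | none => rs
       (pref ++ rs'.map (fun p => pvRow w p.1 p.2), pvDictOf rs', pvLastNameOf rs')) := by
  rcases List.eq_nil_or_concat rs with hrs | ⟨rs₀, p, hrs⟩
  · simp [hrs, pvLastNameOf, pvDictOf]
  · obtain ⟨n, v⟩ := p
    subst hrs
    simp only [List.concat_eq_append, pvLastNameOf, List.getLast?_concat, Option.map_some,
      Option.getD_some]
    by_cases hn : n = ""
    · simp [hn]
    · simp only [hn, ne_eq, not_false_eq_true, if_pos, List.dropLast_concat]
      refine Prod.ext ?_ (Prod.ext ?_ ?_)
      · show pvAppendLast (pref ++ (rs₀ ++ [(n, v)]).map _) _ = _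
        rw [List.map_append, ← List.append_assoc,
          pvAppendLast_append _ _ _ (by simp), List.append_assoc]
        simp [pvAppendLast, pvRow, String.append_assoc]
      · show (pvDictOf (rs₀ ++ [(n, v)])).insert n _ = _
        rw [pvDictOf_concat, pvDictOf_concat]
        simp [PySem.Dict.getD_insert_self, PySem.Dict.insert_insert_self]
      · simp

theorem pvStep_agree (w : Int) (pref : List String) (rs : List (String × String)) (line : String) :
    pvStepA w (pref ++ rs.map (fun p => pvRow w p.1 p.2), pvDictOf rs, pvLastNameOf rs) line
      = (pref ++ (pvStepB rs line).map (fun p => pvRow w p.1 p.2),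
         pvDictOf (pvStepB rs line), pvLastNameOf (pvStepB rs line)) := by
  unfold pvStepA pvStepB
  cases hsp : PySem.Str.splitMax? line ":" 1 with
  | none => exact pvContCase_agree w pref rs line
  | some parts =>
      match parts with
      | [] => exact pvContCase_agree w pref rs line
      | [l0] => exact pvContCase_agree w pref rs line
      | name :: value :: rest =>
          match rest with
          | [] =>
              refine Prod.ext ?_ (Prod.ext ?_ ?_)
              · simp [pvRow, List.append_assoc]
              · simp [pvDictOf_concat]
              · simp [pvLastNameOf]
          | r :: rest' => exact pvContCase_agree w pref rs line

theorem pvFold_agree (w : Int) (pref : List String) (lines : List String) (rs : List (String × String)) :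
    lines.foldl (pvStepA w) (pref ++ rs.map (fun p => pvRow w p.1 p.2), pvDictOf rs, pvLastNameOf rs)
      = (pref ++ (lines.foldl pvStepB rs).map (fun p => pvRow w p.1 p.2),
         pvDictOf (lines.foldl pvStepB rs), pvLastNameOf (lines.foldl pvStepB rs)) := by
  induction lines generalizing rs with
  | nil => rfl
  | cons l ls ih =>
      simp only [List.foldl_cons, pvStep_agree]
      exact ih (pvStepB rs l)

-- ===== VERDICT (by name: the statement is the Claim_ definition above) =====
theorem generate_ascii_table_from_string_spec : Claim_equal_generate_ascii_table_from_string := by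
  intro input_str config logger _ _
  show _ = _
  simp only [generate_ascii_table_from_string, generate_ascii_table_from_string_alt]
  have h : List.foldl (pvStepA (pvMaxLen config))
      ([pvHeader (pvMaxLen config), pvSep (pvMaxLen config)], PySem.Dict.empty, "")
      ((PySem.Str.split? (PySem.Str.strip input_str) "\n").getD [])
      = ([pvHeader (pvMaxLen config), pvSep (pvMaxLen config)] ++
          (((PySem.Str.split? (PySem.Str.strip input_str) "\n").getD []).foldl pvStepB []).map
            (fun p => pvRow (pvMaxLen config) p.1 p.2),
         pvDictOf (((PySem.Str.split? (PySem.Str.strip input_str) "\n").getD []).foldl pvStepB []),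
         pvLastNameOf (((PySem.Str.split? (PySem.Str.strip input_str) "\n").getD []).foldl pvStepB [])) := by
    simpa using pvFold_agree (pvMaxLen config) [pvHeader (pvMaxLen config), pvSep (pvMaxLen config)]
      ((PySem.Str.split? (PySem.Str.strip input_str) "\n").getD []) []
  rw [h]
  simp [pvDictOf]
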